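-- pv_equiv track=rewrite | github.com/7h3v01d/PatchStudioPro | src/old/Patch_diff_PreRefactor.py | _find_string_spans
-- ===== SOURCE A (Python) =====
-- from typing import List, Optional, Tuple, Dict, Any
--
-- def _find_string_spans(s: str, kind: str) -> List[Tuple[int, int, str]]:
--     spans: List[Tuple[int, int, str]] = []
--     i = 0
--     while i < len(s):
--         ch = s[i]
--         if ch in ("'", '"'):
--             q = ch
--             j = i + 1
--             esc = False
--             while j < len(s):
--                 cj = s[j]
--                 if esc:
--                     esc = False
--                     j += 1
--                     continue
--                 if cj == "\\":
--                     esc = True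
--                     j += 1
--                     continue
--                 if cj == q:
--                     spans.append((i, j + 1, kind))
--                     i = j + 1
--                     break
--                 j += 1
--             else:
--                 # unterminated; still mark to end
--                 spans.append((i, len(s), kind))
--                 i = len(s)
--         else:
--             i += 1
--     return spans
-- ===== SOURCE B (Python) =====
-- from typing import List, Tuple
--
-- def _find_string_spans(s: str, kind: str) -> List[Tuple[int, int, str]]:
--     # Single flat state-machine pass instead of nested loops.
--     spans: List[Tuple[int, int, str]] = []
--     in_string = False
--     quote = ''
--     start = 0
--     escaped = False
--     for i, ch in enumerate(s):
--         if not in_string: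
--             if ch == "'" or ch == '"':
--                 in_string = True
--                 quote = ch
--                 start = i
--                 escaped = False
--         else:
--             if escaped:
--                 escaped = False
--             elif ch == '\\':
--                 escaped = True
--             elif ch == quote:
--                 spans.append((start, i + 1, kind))
--                 in_string = False
--     if in_string:
--         spans.append((start, len(s), kind))
--     return spans
-- ===== Notes on version B (the rewrite author's own statement) =====
-- stated objective: simpler
-- what changed: Replaced the nested while-loops (outer scan restarting an inner closing-quote scan with its own index and else-clause) by one flat for-loop state machine (no index re-scanning) over the string with in_string/quote/start/escaped state and a single post-loop fixup for an unterminated string.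
import Mathlib
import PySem

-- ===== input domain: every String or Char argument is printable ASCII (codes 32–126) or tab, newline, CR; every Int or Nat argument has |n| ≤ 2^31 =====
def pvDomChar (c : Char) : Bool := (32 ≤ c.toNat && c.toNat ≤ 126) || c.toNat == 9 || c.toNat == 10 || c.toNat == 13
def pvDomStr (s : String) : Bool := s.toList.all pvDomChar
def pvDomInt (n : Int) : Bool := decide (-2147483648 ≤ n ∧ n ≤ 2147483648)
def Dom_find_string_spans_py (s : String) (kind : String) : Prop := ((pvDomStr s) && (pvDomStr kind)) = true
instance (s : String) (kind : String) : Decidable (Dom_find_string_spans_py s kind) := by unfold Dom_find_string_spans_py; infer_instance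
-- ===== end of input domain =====

-- B replaces A's nested while-loops by one flat state-machine pass (objective: simpler).

-- ===== PORT A =====
-- inner `while j < len(s): ... else:` loop of A: returns the index of the closing
-- quote, or none when the loop runs off the end (the while-else branch).
def aInner (cs : List Char) (q : Char) (j : Nat) (esc : Bool) : Option Nat :=
  if hj : j < cs.length then
    if esc then aInner cs q (j+1) false
    else if cs[j] = '\\' then aInner cs q (j+1) true
    else if cs[j] = q then some j
    else aInner cs q (j+1) esc
  else none
termination_by cs.length - j
decreasing_by all_goals exact Nat.sub_succ_lt_self _ _ hj

-- outer `while i < len(s)` loop of A; `fuel` only makes the recursion structural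
-- (i strictly increases each iteration, so fuel = cs.length is always enough)
def aOuter (cs : List Char) (kind : String) (i : Nat) : Nat → List (Int × Int × String)
  | 0 => []
  | fuel+1 =>
    if hi : i < cs.length then
      if cs[i] = '\'' ∨ cs[i] = '"' then
        match aInner cs (cs[i]) (i+1) false with
        | some j => ((i : Int), (j : Int) + 1, kind) :: aOuter cs kind (j+1) fuel
        | none => [((i : Int), (cs.length : Int), kind)]
      else aOuter cs kind (i+1) fuel
    else []

def find_string_spans_py (s : String) (kind : String) : List (Int × Int × String) :=
  aOuter s.toList kind 0 s.toList.length

-- ===== PORT B =====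
-- the `for i, ch in enumerate(s)` state-machine loop of Source B; state is
-- none = not in a string, some (quote, start, escaped) = inside a string
def bGo (kind : String) (i : Nat) (cs : List Char) (spans : List (Int × Int × String))
    (st : Option (Char × Nat × Bool)) : List (Int × Int × String) × Option (Char × Nat × Bool) :=
  match cs with
  | [] => (spans, st)
  | ch :: rest =>
    match st with
    | none =>
      if ch = '\'' ∨ ch = '"' then bGo kind (i+1) rest spans (some (ch, i, false))
      else bGo kind (i+1) rest spans none
    | some (q, start, esc) =>
      if esc then bGo kind (i+1) rest spans (some (q, start, false))
      else if ch = '\\' then bGo kind (i+1) rest spans (some (q, start, true))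
      else if ch = q then bGo kind (i+1) rest (spans ++ [((start : Int), (i : Int) + 1, kind)]) none
      else bGo kind (i+1) rest spans (some (q, start, esc))

-- the post-loop `if in_string:` fixup of Source B
def bFin (kind : String) (len : Nat) :
    List (Int × Int × String) × Option (Char × Nat × Bool) → List (Int × Int × String)
  | (spans, none) => spans
  | (spans, some (_, start, _)) => spans ++ [((start : Int), (len : Int), kind)]

def find_string_spans_py_alt (s : String) (kind : String) : List (Int × Int × String) :=
  bFin kind s.toList.length (bGo kind 0 s.toList [] none)

-- ===== PRECONDITION & SPEC =====
def Spec_find_string_spans_py (s : String) (kind : String) (out : List (Int × Int × String)) : Prop := out = find_string_spans_py_alt s kind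
instance (s : String) (kind : String) (out : List (Int × Int × String)) : Decidable (Spec_find_string_spans_py s kind out) := by unfold Spec_find_string_spans_py; infer_instance

-- ===== CLAIM (what is proved, stated in full; the proofs are below) =====
def Claim_equal_find_string_spans_py : Prop := ∀ (s : String) (kind : String), Dom_find_string_spans_py s kind → Spec_find_string_spans_py s kind (find_string_spans_py s kind)

-- ===== LEMMAS AND PROOFS =====

mutual
theorem outer_eq (cs : List Char) (kind : String) (i : Nat) (spans : List (Int × Int × String))
    (fuel : Nat) (hf : cs.length - i ≤ fuel) :
    bFin kind cs.length (bGo kind i (cs.drop i) spans none) = spans ++ aOuter cs kind i fuel := by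
  by_cases hi : i < cs.length
  · obtain ⟨f, rfl⟩ : ∃ f, fuel = f + 1 := ⟨fuel - 1, by omega⟩
    rw [List.drop_eq_getElem_cons hi, bGo, aOuter, dif_pos hi]
    by_cases hch : cs[i] = '\'' ∨ cs[i] = '"'
    · rw [if_pos hch, if_pos hch,
        inner_eq cs kind (cs[i]) i (i+1) false spans f (by omega)]
      cases hm : aInner cs (cs[i]) (i+1) false <;> simp
    · rw [if_neg hch, if_neg hch]; exact outer_eq cs kind (i+1) spans f (by omega)
  · rw [List.drop_eq_nil_of_le (le_of_not_gt hi), bGo]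
    cases fuel <;> simp [aOuter, bFin, hi]
termination_by cs.length - i
decreasing_by all_goals omega
theorem inner_eq (cs : List Char) (kind : String) (q : Char) (st : Nat) (j : Nat) (esc : Bool)
    (spans : List (Int × Int × String)) (fuel : Nat) (hf : cs.length - (j+1) ≤ fuel) :
    bFin kind cs.length (bGo kind j (cs.drop j) spans (some (q, st, esc))) =
      (match aInner cs q j esc with
       | some jc => spans ++ ((st : Int), (jc : Int) + 1, kind) :: aOuter cs kind (jc+1) fuel
       | none => spans ++ [((st : Int), (cs.length : Int), kind)]) := by
  by_cases hj : j < cs.length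
  · rw [List.drop_eq_getElem_cons hj, bGo, aInner, dif_pos hj]
    by_cases he : esc = true
    · rw [if_pos he, if_pos he]; exact inner_eq cs kind q st (j+1) false spans fuel (by omega)
    · rw [if_neg he, if_neg he]
      by_cases hb : cs[j] = '\\'
      · rw [if_pos hb, if_pos hb]; exact inner_eq cs kind q st (j+1) true spans fuel (by omega)
      · rw [if_neg hb, if_neg hb]
        by_cases hq : cs[j] = q
        · rw [if_pos hq, if_pos hq, outer_eq cs kind (j+1) _ fuel hf]; simp
        · rw [if_neg hq, if_neg hq]
          have he' : esc = false := by cases esc <;> simp_all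
          rw [he']
          exact inner_eq cs kind q st (j+1) false spans fuel (by omega)
  · rw [List.drop_eq_nil_of_le (le_of_not_gt hj), bGo, aInner, dif_neg hj, bFin]
termination_by cs.length - j
decreasing_by all_goals omega
end

-- ===== VERDICT (by name: the statement is the Claim_ definition above) =====
theorem find_string_spans_py_spec : Claim_equal_find_string_spans_py := by
  intro s kind _
  unfold Spec_find_string_spans_py find_string_spans_py find_string_spans_py_alt
  have h := outer_eq s.toList kind 0 [] s.toList.length (by omega)
  simpa using h.symm
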